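-- pv_equiv track=rewrite | github.com/Klemma/AIML_labs | Lab1/Task 7/task7.py | determine_text_language
-- ===== SOURCE A (Python) =====
-- from string import digits, punctuation
--
-- def prepare_text(text: str) -> str:
--     text = text.lower().replace('\n', ' ')
--     text = text.translate(str.maketrans('', '', digits))
--     text = text.translate(str.maketrans('', '', punctuation))
--     return text
--
-- def get_chars_combinations(text: str, comb_len: int) -> dict:
--     combinations = {}
--     comb = ""
--     for ch in text:
--         if ch != ' ':
--             comb += ch
--         else:
--             comb = ""
--             continue
--         if len(comb) == comb_len:
--             combinations[comb] = 1 if comb not in combinations else combinations[comb] + 1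
--             comb = comb[1:]
--     return combinations
--
-- def determine_text_language(text: str, similar_combs: dict, ru_ch_combs, bg_ch_combs) -> dict:
--     text = prepare_text(text)
--     two_ch_combs = get_chars_combinations(text, 2)
--     three_ch_combs = get_chars_combinations(text, 3)
--     merged_ch_combs = merge_dicts(two_ch_combs, three_ch_combs)
--
--     ru_similarity = 0
--     bg_similarity = 0
--     for comb in merged_ch_combs:
--         if comb in similar_combs:
--             if abs(merged_ch_combs[comb] - ru_ch_combs[comb]) < abs(merged_ch_combs[comb] - bg_ch_combs[comb]):
--                 ru_similarity += 1
--             elif abs(merged_ch_combs[comb] - ru_ch_combs[comb]) > abs(merged_ch_combs[comb] - bg_ch_combs[comb]):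
--                 bg_similarity += 1
--             else:
--                 pass
--     return {'ru': ru_similarity, 'bg': bg_similarity}
--
-- def merge_dicts(dict1: dict, dict2: dict) -> dict:
--     return {**dict1, **dict2}
-- ===== SOURCE B (Python) =====
-- from string import digits, punctuation
--
-- def determine_text_language(text, similar_combs, ru_ch_combs, bg_ch_combs):
--     text = text.lower().replace('\n', ' ')
--     text = text.translate(str.maketrans('', '', digits))
--     text = text.translate(str.maketrans('', '', punctuation))
--     # one counting dict over word n-gram slices instead of a char-by-char
--     # buffer run twice and a dict merge
--     counts = {}
--     for n in (2, 3):
--         for word in text.split(' '):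
--             for i in range(len(word) - n + 1):
--                 g = word[i:i + n]
--                 counts[g] = counts.get(g, 0) + 1
--     ru_similarity = 0
--     bg_similarity = 0
--     for g, c in counts.items():
--         if g in similar_combs:
--             d_ru = abs(c - ru_ch_combs[g])
--             d_bg = abs(c - bg_ch_combs[g])
--             if d_ru < d_bg:
--                 ru_similarity += 1
--             elif d_ru > d_bg:
--                 bg_similarity += 1
--     return {'ru': ru_similarity, 'bg': bg_similarity}
-- ===== Notes on version B (the rewrite author's own statement) =====
-- stated objective: alternative
-- what changed: Replaces the char-by-char sliding-buffer accumulator run twice plus a dict merge with a split-into-words decomposition: n-grams are taken as index slices of each word and counted into a single dict, whose items drive the unchanged tally comparison.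
import Mathlib
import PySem

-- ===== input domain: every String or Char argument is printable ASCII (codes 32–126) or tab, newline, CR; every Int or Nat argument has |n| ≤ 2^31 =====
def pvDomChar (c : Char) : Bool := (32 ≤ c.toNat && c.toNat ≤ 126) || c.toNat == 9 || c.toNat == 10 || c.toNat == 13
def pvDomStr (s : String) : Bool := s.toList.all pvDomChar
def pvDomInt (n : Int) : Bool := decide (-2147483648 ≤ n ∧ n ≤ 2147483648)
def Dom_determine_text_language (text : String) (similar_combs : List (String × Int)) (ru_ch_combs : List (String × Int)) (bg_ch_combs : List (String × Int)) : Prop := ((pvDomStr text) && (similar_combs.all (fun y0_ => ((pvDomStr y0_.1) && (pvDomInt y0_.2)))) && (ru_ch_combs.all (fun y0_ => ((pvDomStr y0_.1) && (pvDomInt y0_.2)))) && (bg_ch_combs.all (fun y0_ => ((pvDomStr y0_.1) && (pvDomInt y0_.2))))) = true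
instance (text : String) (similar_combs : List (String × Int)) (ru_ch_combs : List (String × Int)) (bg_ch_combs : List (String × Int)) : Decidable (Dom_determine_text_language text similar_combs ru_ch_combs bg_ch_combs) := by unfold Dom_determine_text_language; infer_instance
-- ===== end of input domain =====

-- B replaces A's char-by-char sliding-buffer counting (run twice, then a dict
-- merge) by splitting the cleaned text into words and counting each word's
-- 2-/3-gram index slices into a single dict; same return value (alternative
-- decomposition, no speed claim).

-- shared helpers: string.digits / string.punctuation and prepare_text, which
-- both A and B perform verbatim (lower, '\n'->' ', delete digits, delete
-- punctuation; str.translate with a deletion table removes exactly those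
-- characters, ported as a filter — exact)
def pvDigits : List Char := "0123456789".toList
def pvPunct : List Char := "!\"#$%&'()*+,-./:;<=>?@[\\]^_`{|}~".toList
def prepare_text (text : String) : List Char :=
  (((PySem.Chars.replace (PySem.Chars.lower text.toList) ['\n'] [' ']).filter
      (fun c => !(pvDigits.contains c))).filter
      (fun c => !(pvPunct.contains c)))

-- dict lookup on the association-list convention (first match), used by both
-- ports for `comb in similar_combs` / `ru_ch_combs[comb]` / `bg_ch_combs[comb]`
def pvLookup (pairs : List (String × Int)) (k : List Char) : Option Int :=
  (pairs.find? (fun p => p.1.toList == k)).map (·.2)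

-- ===== PORT A =====
-- A's char loop: buffer comb grows per char, resets at ' ', emits into the
-- counting dict when it reaches comb_len (comb[1:] = drop 1)
def get_chars_combinations (t : List Char) (comb_len : Nat) : PySem.Dict (List Char) Int :=
  (t.foldl (fun (st : PySem.Dict (List Char) Int × List Char) ch =>
      if ch ≠ ' ' then
        let comb := st.2 ++ [ch]
        if comb.length = comb_len then
          (st.1.insert comb (if st.1.contains comb then st.1.getD comb 0 + 1 else 1), comb.drop 1)
        else (st.1, comb)
      else (st.1, [])) (PySem.Dict.empty, [])).1

def merge_dicts (d1 d2 : PySem.Dict (List Char) Int) : PySem.Dict (List Char) Int :=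
  d1.update d2.items   -- {**d1, **d2}

def determine_text_language (text : String) (similar_combs : List (String × Int)) (ru_ch_combs : List (String × Int)) (bg_ch_combs : List (String × Int)) : List (String × Int) :=
  let t := prepare_text text
  let two_ch_combs := get_chars_combinations t 2
  let three_ch_combs := get_chars_combinations t 3
  let merged_ch_combs := merge_dicts two_ch_combs three_ch_combs
  let res := merged_ch_combs.keys.foldl (fun (rb : Int × Int) comb =>
    if (pvLookup similar_combs comb).isSome then
      let m := merged_ch_combs.getD comb 0
      let r := (pvLookup ru_ch_combs comb).getD 0
      let b := (pvLookup bg_ch_combs comb).getD 0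
      if |m - r| < |m - b| then (rb.1 + 1, rb.2)
      else if |m - r| > |m - b| then (rb.1, rb.2 + 1)
      else rb
    else rb) (0, 0)
  [("ru", res.1), ("bg", res.2)]

-- ===== PORT B =====
def determine_text_language_alt (text : String) (similar_combs : List (String × Int)) (ru_ch_combs : List (String × Int)) (bg_ch_combs : List (String × Int)) : List (String × Int) :=
  let t := prepare_text text
  -- for n in (2,3): for word in text.split(' '): for i in range(len(word)-n+1)
  -- (word[i:i+n] = (word.drop i).take n, PySem.List.slice_natCast_add)
  let counts := ([2, 3] : List Nat).foldl (fun d n =>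
      (PySem.Chars.splitOn t [' ']).foldl (fun d w =>
        (List.range (w.length + 1 - n)).foldl (fun (d : PySem.Dict (List Char) Int) i =>
          let g := (w.drop i).take n
          d.insert g (d.getD g 0 + 1)) d) d) PySem.Dict.empty
  let res := counts.items.foldl (fun (rb : Int × Int) gc =>
    if (pvLookup similar_combs gc.1).isSome then
      let d_ru := |gc.2 - (pvLookup ru_ch_combs gc.1).getD 0|
      let d_bg := |gc.2 - (pvLookup bg_ch_combs gc.1).getD 0|
      if d_ru < d_bg then (rb.1 + 1, rb.2)
      else if d_ru > d_bg then (rb.1, rb.2 + 1)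
      else rb
    else rb) (0, 0)
  [("ru", res.1), ("bg", res.2)]

-- ===== PRECONDITION & SPEC =====
-- the 2-/3-grams of the words of the cleaned text (used only to state Pre_)
def pvGrams (n : Nat) (w : List Char) : List (List Char) :=
  (List.range (w.length + 1 - n)).map (fun i => (w.drop i).take n)
def pvCombs (text : String) : List (List Char) :=
  (PySem.Chars.splitOn (prepare_text text) [' ']).flatMap (pvGrams 2) ++
  (PySem.Chars.splitOn (prepare_text text) [' ']).flatMap (pvGrams 3)
-- Pre_ excludes exactly the inputs where Python A raises KeyError: some 2-/3-gram
-- of the cleaned text is a key of similar_combs but missing from ru_ch_combs or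
-- bg_ch_combs (Python B raises there too)
def Pre_determine_text_language (text : String) (similar_combs : List (String × Int)) (ru_ch_combs : List (String × Int)) (bg_ch_combs : List (String × Int)) : Prop :=
  ∀ g ∈ pvCombs text, (pvLookup similar_combs g).isSome = true →
    ((pvLookup ru_ch_combs g).isSome = true ∧ (pvLookup bg_ch_combs g).isSome = true)
instance (text : String) (similar_combs : List (String × Int)) (ru_ch_combs : List (String × Int)) (bg_ch_combs : List (String × Int)) : Decidable (Pre_determine_text_language text similar_combs ru_ch_combs bg_ch_combs) := by unfold Pre_determine_text_language; infer_instance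
def pvWitness_determine_text_language : String × (List (String × Int)) × (List (String × Int)) × (List (String × Int)) :=
  ("ab ab", [("ab", 1)], [("ab", 2)], [("ab", 5)])
def Spec_determine_text_language (text : String) (similar_combs : List (String × Int)) (ru_ch_combs : List (String × Int)) (bg_ch_combs : List (String × Int)) (out : List (String × Int)) : Prop := out = determine_text_language_alt text similar_combs ru_ch_combs bg_ch_combs
instance (text : String) (similar_combs : List (String × Int)) (ru_ch_combs : List (String × Int)) (bg_ch_combs : List (String × Int)) (out : List (String × Int)) : Decidable (Spec_determine_text_language text similar_combs ru_ch_combs bg_ch_combs out) := by unfold Spec_determine_text_language; infer_instance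

-- ===== CLAIM (what is proved, stated in full; the proofs are below) =====
def Claim_equal_determine_text_language : Prop := ∀ (text : String) (similar_combs : List (String × Int)) (ru_ch_combs : List (String × Int)) (bg_ch_combs : List (String × Int)), Dom_determine_text_language text similar_combs ru_ch_combs bg_ch_combs → Pre_determine_text_language text similar_combs ru_ch_combs bg_ch_combs → Spec_determine_text_language text similar_combs ru_ch_combs bg_ch_combs (determine_text_language text similar_combs ru_ch_combs bg_ch_combs)

-- ===== LEMMAS AND PROOFS =====

-- the words of t (split at ' '), and the emission stream of A's buffer loop
def pvWords : List Char → List (List Char)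
  | [] => [[]]
  | c :: t =>
    if c = ' ' then [] :: pvWords t
    else
      match pvWords t with
      | [] => [[c]]
      | w :: ws => (c :: w) :: ws

def scanEmit (n : Nat) : List Char → List Char → List (List Char)
  | _, [] => []
  | comb, ch :: t =>
    if ch ≠ ' ' then
      let c := comb ++ [ch]
      if c.length = n then c :: scanEmit n (c.drop 1) t else scanEmit n c t
    else scanEmit n [] t

def pvStream (t : List Char) : List (List Char) :=
  (pvWords t).flatMap (pvGrams 2) ++ (pvWords t).flatMap (pvGrams 3)

lemma pvWords_ne_nil (t : List Char) : pvWords t ≠ [] := by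
  cases t with
  | nil => simp [pvWords]
  | cons c t =>
    simp only [pvWords]
    split
    · simp
    · split <;> simp


lemma splitOn_go_eq (l : List Char) : ∀ (fuel : Nat) (cur : List Char) (acc : List (List Char)),
    l.length ≤ fuel →
    PySem.Chars.splitOn.go [' '] fuel l cur acc =
      acc.reverse ++ (match pvWords l with
        | [] => []
        | w :: ws => (cur.reverse ++ w) :: ws) := by
  induction l with
  | nil =>
    intro fuel cur acc _
    cases fuel with
    | zero => simp [PySem.Chars.splitOn.go, pvWords]
    | succ f => simp [PySem.Chars.splitOn.go, pvWords]
  | cons c rest ih =>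
    intro fuel cur acc hf
    cases fuel with
    | zero => simp at hf
    | succ f =>
      have hrest : rest.length ≤ f := by simpa using hf
      by_cases hc : c = ' '
      · subst hc
        have hpre : ([' '] : List Char).isPrefixOf (' ' :: rest) = true := by
          simp [List.isPrefixOf]
        simp only [PySem.Chars.splitOn.go, hpre, if_true, List.length_cons,
          List.length_nil, List.drop_succ_cons, List.drop_zero, Nat.zero_add]
        rw [ih f [] (cur.reverse :: acc) hrest]
        cases hpw : pvWords rest with
        | nil => exact absurd hpw (pvWords_ne_nil rest)
        | cons w ws => simp [pvWords, hpw]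
      · have hpre : ([' '] : List Char).isPrefixOf (c :: rest) = false := by
          simp [List.isPrefixOf]
          exact fun h => absurd h.symm hc
        simp only [PySem.Chars.splitOn.go, hpre, Bool.false_eq_true, if_false]
        rw [ih f (c :: cur) acc hrest]
        cases hpw : pvWords rest with
        | nil => exact absurd hpw (pvWords_ne_nil rest)
        | cons w ws => simp [pvWords, hc, hpw]

lemma splitOn_eq_pvWords (t : List Char) : PySem.Chars.splitOn t [' '] = pvWords t := by
  unfold PySem.Chars.splitOn
  rw [splitOn_go_eq t (t.length + 1) [] [] (by omega)]
  cases hpw : pvWords t with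
  | nil => exact absurd hpw (pvWords_ne_nil t)
  | cons w ws => simp

lemma pvGrams_of_lt {n : Nat} {u : List Char} (h : u.length < n) : pvGrams n u = [] := by
  unfold pvGrams
  have : u.length + 1 - n = 0 := by omega
  simp [this]

lemma pvGrams_cons {n : Nat} {u : List Char} (hn : n ≤ u.length) (hne : u ≠ []) :
    pvGrams n u = u.take n :: pvGrams n u.tail := by
  cases u with
  | nil => exact absurd rfl hne
  | cons x xs =>
    simp only [pvGrams, List.tail_cons]
    have hlen : (x :: xs).length + 1 - n = (xs.length + 1 - n) + 1 := by
      simp only [List.length_cons] at hn ⊢; omega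
    rw [hlen, List.range_succ_eq_map]
    simp [List.map_map, Function.comp_def]

lemma length_of_mem_pvGrams {n : Nat} {w g : List Char} (h : g ∈ pvGrams n w) : g.length = n := by
  unfold pvGrams at h
  simp only [List.mem_map, List.mem_range] at h
  obtain ⟨i, hi, rfl⟩ := h
  simp only [List.length_take, List.length_drop]
  omega

lemma scanEmit_eq (n : Nat) (t : List Char) : ∀ comb : List Char, comb.length < n →
    scanEmit n comb t =
      (match pvWords t with
        | [] => []
        | w :: ws => pvGrams n (comb ++ w) ++ ws.flatMap (pvGrams n)) := by
  induction t with
  | nil =>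
    intro comb h
    simp [scanEmit, pvWords, pvGrams_of_lt (by simpa using h)]
  | cons ch t ih =>
    intro comb h
    by_cases hch : ch = ' '
    · subst hch
      have hstep : scanEmit n comb (' ' :: t) = scanEmit n [] t := by simp [scanEmit]
      rw [hstep, ih [] (by simp only [List.length_nil]; omega)]
      have hpw' : pvWords (' ' :: t) = [] :: pvWords t := by simp [pvWords]
      cases hpw : pvWords t with
      | nil => exact absurd hpw (pvWords_ne_nil t)
      | cons w ws =>
        simp only [hpw', hpw]
        simp [pvGrams_of_lt h]
    · cases hpw : pvWords t with
      | nil => exact absurd hpw (pvWords_ne_nil t)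
      | cons w ws =>
        have hnen : (comb ++ [ch] : List Char) ≠ [] := by simp
        have hpw' : pvWords (ch :: t) = (ch :: w) :: ws := by
          simp only [pvWords, if_neg hch, hpw]
        have hassoc : comb ++ ch :: w = (comb ++ [ch]) ++ w := by simp
        by_cases hlen : (comb ++ [ch]).length = n
        · have hlen2 : comb.length + 1 = n := by simpa using hlen
          have hstep : scanEmit n comb (ch :: t) =
              (comb ++ [ch]) :: scanEmit n ((comb ++ [ch]).drop 1) t := by
            simp [scanEmit, hch, hlen2]
          rw [hstep, ih ((comb ++ [ch]).drop 1) (by simp; omega)]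
          have hgr : pvGrams n (comb ++ ch :: w) =
              (comb ++ [ch]) :: pvGrams n ((comb ++ [ch]).drop 1 ++ w) := by
            rw [hassoc, pvGrams_cons (by simp; omega) (by simp),
              List.take_left' hlen, List.tail_append_of_ne_nil hnen, List.drop_one]
          simp only [hpw, hpw', hgr]
          simp
        · have hlen2 : ¬(comb.length + 1 = n) := by simpa using hlen
          have hstep : scanEmit n comb (ch :: t) = scanEmit n (comb ++ [ch]) t := by
            simp [scanEmit, hch, hlen2]
          rw [hstep, ih (comb ++ [ch]) (by simp; omega)]
          simp only [hpw, hpw', hassoc]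

lemma scanEmit_nil_eq (n : Nat) (hn : 0 < n) (t : List Char) :
    scanEmit n [] t = (pvWords t).flatMap (pvGrams n) := by
  rw [scanEmit_eq n t [] (by simpa using hn)]
  cases hpw : pvWords t with
  | nil => exact absurd hpw (pvWords_ne_nil t)
  | cons w ws => simp

lemma insA_eq (d : PySem.Dict (List Char) Int) (g : List Char) :
    d.insert g (if d.contains g then d.getD g 0 + 1 else 1) = d.insert g (d.getD g 0 + 1) := by
  by_cases h : d.contains g = true
  · simp [h]
  · simp only [Bool.not_eq_true] at h
    simp [PySem.Dict.getD_of_not_contains, h]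

lemma gcc_fold (n : Nat) (t : List Char) : ∀ (d : PySem.Dict (List Char) Int) (comb : List Char),
    (t.foldl (fun (st : PySem.Dict (List Char) Int × List Char) ch =>
      if ch ≠ ' ' then
        let c := st.2 ++ [ch]
        if c.length = n then
          (st.1.insert c (if st.1.contains c then st.1.getD c 0 + 1 else 1), c.drop 1)
        else (st.1, c)
      else (st.1, [])) (d, comb)).1 =
      (scanEmit n comb t).foldl (fun d x => d.insert x (d.getD x 0 + 1)) d := by
  induction t with
  | nil => intro d comb; simp [scanEmit]
  | cons ch t ih =>
    intro d comb
    by_cases hch : ch = ' '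
    · subst hch
      simp only [List.foldl_cons, ne_eq, not_true_eq_false, if_false]
      rw [ih d []]
      simp [scanEmit]
    · by_cases hlen : (comb ++ [ch]).length = n
      · simp only [List.foldl_cons, hch, ne_eq, not_false_eq_true, if_true, hlen]
        rw [ih]
        have hlen2 : comb.length + 1 = n := by simpa using hlen
        have hstep : scanEmit n comb (ch :: t) =
            (comb ++ [ch]) :: scanEmit n ((comb ++ [ch]).drop 1) t := by
          simp [scanEmit, hch, hlen2]
        rw [hstep, List.foldl_cons, insA_eq]
      · simp only [List.foldl_cons, hch, ne_eq, not_false_eq_true, if_true, hlen, reduceIte]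
        rw [ih]
        have hlen2 : ¬(comb.length + 1 = n) := by simpa using hlen
        have hstep : scanEmit n comb (ch :: t) = scanEmit n (comb ++ [ch]) t := by
          simp [scanEmit, hch, hlen2]
        rw [hstep]

lemma gcc_eq_counter (t : List Char) (n : Nat) (hn : 0 < n) :
    get_chars_combinations t n = PySem.Dict.counter ((pvWords t).flatMap (pvGrams n)) := by
  unfold get_chars_combinations
  rw [gcc_fold n t PySem.Dict.empty [], scanEmit_nil_eq n hn t,
    PySem.Dict.foldl_insert_getD_add_one_eq_counter]

lemma merge_counters (S2 S3 : List (List Char))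
    (h2 : ∀ g ∈ S2, g.length = 2) (h3 : ∀ g ∈ S3, g.length = 3) :
    merge_dicts (PySem.Dict.counter S2) (PySem.Dict.counter S3) = PySem.Dict.counter (S2 ++ S3) := by
  have hne2 : ∀ g ∈ S2, g ∉ S3 := by
    intro g hg hg3
    have := h2 g hg; have := h3 g hg3; omega
  have hne3 : ∀ g ∈ S3, g ∉ S2 := by
    intro g hg hg2
    have := h2 g hg2; have := h3 g hg; omega
  apply PySem.Dict.ext
  have hfresh : ∀ p ∈ (PySem.Dict.counter S3).items, (PySem.Dict.counter S2).contains p.1 = false := by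
    intro p hp
    have hk : p.1 ∈ (PySem.Dict.counter S3).keys := by
      have h1 : p.1 ∈ (PySem.Dict.counter S3).items.map (·.1) := List.mem_map_of_mem hp
      exact h1
    rw [PySem.Dict.keys_counter] at hk
    have hk3 : p.1 ∈ S3 := (PySem.Set.mem_ofList _ _).mp hk
    rw [PySem.Dict.contains_counter]
    simp only [List.contains_eq_mem, decide_eq_false_iff_not]
    exact hne3 _ hk3
  have hnd : (List.map Prod.fst (PySem.Dict.counter S3).items).Nodup := by
    have := PySem.Dict.nodup_keys_counter (κ := List Char) S3
    simpa [PySem.Dict.keys] using this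
  have hlhs : (merge_dicts (PySem.Dict.counter S2) (PySem.Dict.counter S3)).items =
      (PySem.Dict.counter S2).items ++ (PySem.Dict.counter S3).items := by
    unfold merge_dicts PySem.Dict.update
    rw [PySem.Dict.items_foldl_insert_fresh _ _ _ _ hfresh hnd]
    simp
  rw [hlhs, PySem.Dict.items_counter, PySem.Dict.items_counter, PySem.Dict.items_counter,
    PySem.Set.ofList_append, PySem.Set.update_eq_append_filter]
  have hfilter : List.filter (fun y => !(PySem.Set.ofList S2).contains y) (PySem.Set.ofList S3) =
      PySem.Set.ofList S3 := by
    apply List.filter_eq_self.mpr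
    intro y hy
    have hy3 : y ∈ S3 := (PySem.Set.mem_ofList _ _).mp hy
    simp only [Bool.not_eq_eq_eq_not, Bool.not_true]
    refine Bool.eq_false_iff.mpr (fun hc => hne3 y hy3 ?_)
    exact (PySem.Set.mem_ofList _ _).mp ((PySem.Set.contains_iff _ _).mp hc)
  rw [hfilter, List.map_append]
  congr 1
  · apply List.map_congr_left
    intro k hk
    have hk2 : k ∈ S2 := (PySem.Set.mem_ofList _ _).mp hk
    have : List.count k S3 = 0 := List.count_eq_zero.mpr (hne2 k hk2)
    simp [List.count_append, this]
  · apply List.map_congr_left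
    intro k hk
    have hk3 : k ∈ S3 := (PySem.Set.mem_ofList _ _).mp hk
    have : List.count k S2 = 0 := List.count_eq_zero.mpr (hne3 k hk3)
    simp [List.count_append, this]

lemma foldl_flatMap_grams (n : Nat) (ws : List (List Char)) (d : PySem.Dict (List Char) Int) :
    ws.foldl (fun d w => (pvGrams n w).foldl (fun d x => d.insert x (d.getD x 0 + 1)) d) d =
      (ws.flatMap (pvGrams n)).foldl (fun d x => d.insert x (d.getD x 0 + 1)) d := by
  induction ws generalizing d with
  | nil => simp
  | cons w ws ih => simp [List.foldl_append, ih]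

lemma range_fold_eq (n : Nat) (w : List Char) (d : PySem.Dict (List Char) Int) :
    (List.range (w.length + 1 - n)).foldl (fun (d : PySem.Dict (List Char) Int) i =>
        d.insert ((w.drop i).take n) (d.getD ((w.drop i).take n) 0 + 1)) d =
      (pvGrams n w).foldl (fun d x => d.insert x (d.getD x 0 + 1)) d := by
  rw [pvGrams, List.foldl_map]

def pvTally (dct : PySem.Dict (List Char) Int) (sim ru bg : List (String × Int)) : Int × Int :=
  dct.keys.foldl (fun (rb : Int × Int) comb =>
    if (pvLookup sim comb).isSome then
      let m := dct.getD comb 0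
      let r := (pvLookup ru comb).getD 0
      let b := (pvLookup bg comb).getD 0
      if |m - r| < |m - b| then (rb.1 + 1, rb.2)
      else if |m - r| > |m - b| then (rb.1, rb.2 + 1)
      else rb
    else rb) (0, 0)

lemma A_eq (text : String) (sim ru bg : List (String × Int)) :
    determine_text_language text sim ru bg =
      (let res := pvTally (PySem.Dict.counter (pvStream (prepare_text text))) sim ru bg
       [("ru", res.1), ("bg", res.2)]) := by
  have hm : merge_dicts (get_chars_combinations (prepare_text text) 2)
        (get_chars_combinations (prepare_text text) 3) =
      PySem.Dict.counter (pvStream (prepare_text text)) := by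
    rw [gcc_eq_counter _ 2 (by omega), gcc_eq_counter _ 3 (by omega)]
    apply merge_counters
    · intro g hg
      obtain ⟨w, _, hgw⟩ := List.mem_flatMap.mp hg
      exact length_of_mem_pvGrams hgw
    · intro g hg
      obtain ⟨w, _, hgw⟩ := List.mem_flatMap.mp hg
      exact length_of_mem_pvGrams hgw
  simp only [determine_text_language, hm, pvTally]

lemma B_eq (text : String) (sim ru bg : List (String × Int)) :
    determine_text_language_alt text sim ru bg =
      (let res := pvTally (PySem.Dict.counter (pvStream (prepare_text text))) sim ru bg
       [("ru", res.1), ("bg", res.2)]) := by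
  have hc : ([2, 3] : List Nat).foldl (fun d n =>
      (PySem.Chars.splitOn (prepare_text text) [' ']).foldl (fun d w =>
        (List.range (w.length + 1 - n)).foldl (fun (d : PySem.Dict (List Char) Int) i =>
          d.insert ((w.drop i).take n) (d.getD ((w.drop i).take n) 0 + 1)) d) d)
      PySem.Dict.empty = PySem.Dict.counter (pvStream (prepare_text text)) := by
    simp only [List.foldl_cons, List.foldl_nil, splitOn_eq_pvWords, range_fold_eq,
      foldl_flatMap_grams]
    rw [← List.foldl_append, PySem.Dict.foldl_insert_getD_add_one_eq_counter]
    rfl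
  have hnd : (PySem.Dict.counter (pvStream (prepare_text text))).keys.Nodup :=
    PySem.Dict.nodup_keys_counter _
  simp only [determine_text_language_alt, hc, pvTally]
  rw [PySem.Dict.items_eq_map_keys _ hnd 0, List.foldl_map]

-- ===== VERDICT (by name: the statement is the Claim_ definition above) =====
theorem determine_text_language_spec : Claim_equal_determine_text_language := by
  intro text similar_combs ru_ch_combs bg_ch_combs _ _
  unfold Spec_determine_text_language
  rw [A_eq, B_eq]
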